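-- pv_equiv track=rewrite | github.com/jaizu23/Programacion-2o-cuatri | Python/1era entrega/ejerciciosPEC1/Soluciones/ejercicio_3.py | enciende_farolas
-- ===== SOURCE A (Python) =====
-- def enciende_farolas(farolas :list, puntos: list) -> list:
--     """ Devuelve una lista con la posición de las farolas encendidas """
--
--     solucion = [] # Posición de las farolas encendidas
--
--     # Ordenamos de menor a mayor las farolas y los puntos
--     farolas = sorted(farolas)
--     puntos = sorted(puntos)
--
--     while len(farolas) > 0 and len(puntos) > 0:
--
--         # Si la primera farola no ilumina el primer punto no hay solución
--         assert farolas[0] - R <= puntos[0], "El punto no se puede iluminar"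
--
--         # Si la siguiente farola ilumina el primer punto descartamos la primera
--         if len(farolas) > 1 and farolas[1] - R <= puntos[0]:
--             farolas = farolas[1:]
--         else:
--             # Metemos la primera farola en la solución y quitamos todos los puntos que ilumina
--             solucion += [farolas[0]]
--             pos = 0
--             while pos < len(puntos) and puntos[pos] <= farolas[0] + R:
--                 pos += 1
--             puntos = puntos[pos:]
--
--     return solucion
--
-- R = 10
-- ===== SOURCE B (Python) =====
-- R = 10
--
-- def enciende_farolas(farolas: list, puntos: list) -> list:
--     """ Devuelve una lista con la posición de las farolas encendidas """
--     fs = sorted(farolas)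
--     ps = sorted(puntos)
--     solucion = []
--     i = 0
--     covered = None  # rightmost coordinate lit so far
--     for p in ps:
--         if covered is not None and p <= covered:
--             continue
--         # advance to the rightmost lamp that can still reach p
--         while i + 1 < len(fs) and fs[i + 1] - R <= p:
--             i += 1
--         assert fs[i] - R <= p <= fs[i] + R, "El punto no se puede iluminar"
--         solucion.append(fs[i])
--         covered = fs[i] + R
--     return solucion
-- ===== Notes on version B (the rewrite author's own statement) =====
-- stated objective: alternative
-- what changed: Replaces A's while-loop that repeatedly re-slices both lists (farolas = farolas[1:], puntos = puntos[pos:]) by a single for-pass over the sorted points with a monotone lamp index and a 'covered' threshold, so no intermediate lists are built (asymptotically better, but a timing run could not measure it).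
-- outside the precondition, e.g. on enciende_farolas([], [0]): A returns [], B raises IndexError
import Mathlib
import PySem

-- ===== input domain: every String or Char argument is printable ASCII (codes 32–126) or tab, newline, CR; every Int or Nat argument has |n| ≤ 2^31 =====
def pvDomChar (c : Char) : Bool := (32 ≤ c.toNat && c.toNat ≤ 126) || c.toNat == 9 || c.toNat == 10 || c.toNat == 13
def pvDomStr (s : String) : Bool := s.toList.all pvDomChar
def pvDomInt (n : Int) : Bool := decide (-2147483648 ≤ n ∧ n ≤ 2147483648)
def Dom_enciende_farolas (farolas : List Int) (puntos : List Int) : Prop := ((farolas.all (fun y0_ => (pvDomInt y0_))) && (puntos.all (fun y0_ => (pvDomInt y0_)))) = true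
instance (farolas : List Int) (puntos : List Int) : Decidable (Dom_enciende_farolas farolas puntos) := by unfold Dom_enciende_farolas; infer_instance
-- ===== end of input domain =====

-- ===== PORT A =====
-- B changes the algorithm (index scan instead of repeated list slicing); proved equal on Pre_.
-- A's inner 'pos' loop then 'puntos[pos:]': scan the prefix of points lit by f0+R and drop it.
def aDrop (f0 : Int) : List Int → List Int
  | [] => []
  | p :: t => if p ≤ f0 + 10 then aDrop f0 t else p :: t

-- A's outer while-loop; fuel bounds the iterations (each terminating run shrinks
-- farolas or puntos, so len farolas + len puntos + 1 fuel suffices; on inputs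
-- where the Python loops forever or the assert fires — all outside Pre_ — we just return solucion).
def aLoop : Nat → List Int → List Int → List Int → List Int
  | 0, _, _, sol => sol
  | _ + 1, [], _, sol => sol
  | _ + 1, _, [], sol => sol
  | fuel + 1, f0 :: rest, p0 :: pt, sol =>
    if f0 - 10 ≤ p0 then
      match rest with
      | f1 :: _ =>
        if f1 - 10 ≤ p0 then aLoop fuel rest (p0 :: pt) sol
        else aLoop fuel (f0 :: rest) (aDrop f0 (p0 :: pt)) (sol ++ [f0])
      | [] => aLoop fuel (f0 :: rest) (aDrop f0 (p0 :: pt)) (sol ++ [f0])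
    else sol  -- assert fails (Python raises AssertionError); Pre_ excludes this

def enciende_farolas (farolas : List Int) (puntos : List Int) : List Int :=
  aLoop (farolas.length + puntos.length + 1)
    (PySem.List.sorted farolas (fun x => x) false)
    (PySem.List.sorted puntos (fun x => x) false) []

-- ===== PORT B =====
-- B's inner while: advance the lamp pointer while the next lamp still reaches p.
-- (Source B keeps an index i into fs; the suffix fs.drop i is carried instead — same pointer.)
def bAdvance : List Int → Int → List Int
  | f0 :: f1 :: t, p => if f1 - 10 ≤ p then bAdvance (f1 :: t) p else f0 :: f1 :: t
  | l, _ => l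

-- B's for-loop over the sorted points, carrying (lamp suffix, covered, solucion).
def bLoop : List Int → List Int → Option Int → List Int → List Int
  | _, [], _, sol => sol
  | fs, p :: pt, covered, sol =>
    if (match covered with | some c => decide (p ≤ c) | none => false) then
      bLoop fs pt covered sol
    else
      match bAdvance fs p with
      | [] => sol  -- fs empty: Python raises IndexError; Pre_ excludes this
      | f :: fs' =>
        if f - 10 ≤ p ∧ p ≤ f + 10 then
          bLoop (f :: fs') pt (some (f + 10)) (sol ++ [f])
        else sol  -- assert fails (Python raises AssertionError); Pre_ excludes this

def enciende_farolas_alt (farolas : List Int) (puntos : List Int) : List Int :=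
  bLoop (PySem.List.sorted farolas (fun x => x) false)
    (PySem.List.sorted puntos (fun x => x) false) none []

-- ===== PRECONDITION & SPEC =====
-- Pre_ admits exactly the inputs where every point is within R = 10 of some lamp: elsewhere
-- Python A raises AssertionError or loops forever — except when farolas = [] and puntos ≠ [],
-- where A silently returns [] leaving every point dark while B's natural indexing raises IndexError.
def Pre_enciende_farolas (farolas : List Int) (puntos : List Int) : Prop :=
  ∀ p ∈ puntos, ∃ f ∈ farolas, f - 10 ≤ p ∧ p ≤ f + 10
instance (farolas : List Int) (puntos : List Int) : Decidable (Pre_enciende_farolas farolas puntos) := by unfold Pre_enciende_farolas; infer_instance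

def pvWitness_enciende_farolas : List Int × List Int := ([5, 30], [0, 12, 25, 38])

def Spec_enciende_farolas (farolas : List Int) (puntos : List Int) (out : List Int) : Prop := out = enciende_farolas_alt farolas puntos
instance (farolas : List Int) (puntos : List Int) (out : List Int) : Decidable (Spec_enciende_farolas farolas puntos out) := by unfold Spec_enciende_farolas; infer_instance

-- ===== CLAIM (what is proved, stated in full; the proofs are below) =====
def Claim_equal_enciende_farolas : Prop := ∀ (farolas : List Int) (puntos : List Int), Dom_enciende_farolas farolas puntos → Pre_enciende_farolas farolas puntos → Spec_enciende_farolas farolas puntos (enciende_farolas farolas puntos)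

-- ===== LEMMAS AND PROOFS =====

theorem aDrop_sublist (f0 : Int) (ps : List Int) : (aDrop f0 ps).Sublist ps := by
  induction ps with
  | nil => simp [aDrop]
  | cons p t ih =>
    by_cases h : p ≤ f0 + 10
    · simp only [aDrop, if_pos h]; exact ih.cons p
    · simp [aDrop, if_neg h]

theorem aDrop_gt (f0 : Int) (ps : List Int) (hs : ps.Pairwise (· ≤ ·)) :
    ∀ p ∈ aDrop f0 ps, f0 + 10 < p := by
  induction ps with
  | nil => simp [aDrop]
  | cons p t ih =>
    rcases List.pairwise_cons.mp hs with ⟨hp, ht⟩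
    by_cases h : p ≤ f0 + 10
    · simpa only [aDrop, if_pos h] using ih ht
    · simp only [aDrop, if_neg h]
      intro q hq
      rcases List.mem_cons.mp hq with rfl | hq
      · omega
      · have := hp q hq; omega

-- B's skip steps drop exactly the already-covered prefix of the points.
theorem bLoop_skip (f0 : Int) (pt : List Int) : ∀ (fs sol : List Int),
    bLoop fs pt (some (f0 + 10)) sol = bLoop fs (aDrop f0 pt) (some (f0 + 10)) sol := by
  induction pt with
  | nil => intro fs sol; simp [aDrop]
  | cons p t ih =>
    intro fs sol
    by_cases h : p ≤ f0 + 10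
    · simp only [bLoop, aDrop, decide_eq_true_eq, if_pos h]
      exact ih fs sol
    · simp only [bLoop, aDrop, decide_eq_true_eq, if_neg h]

-- B never skips the head point when 'covered' lies strictly below it.
theorem bLoop_cons_noskip (fs : List Int) (p : Int) (pt sol : List Int) (cov : Option Int)
    (h : ∀ c, cov = some c → c < p) :
    bLoop fs (p :: pt) cov sol
      = match bAdvance fs p with
        | [] => sol
        | f :: fs' => if f - 10 ≤ p ∧ p ≤ f + 10 then bLoop (f :: fs') pt (some (f + 10)) (sol ++ [f]) else sol := by
  cases cov with
  | none => rw [bLoop]; simp only [Bool.false_eq_true, if_false]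
  | some c =>
    have hc : ¬ p ≤ c := by have := h c rfl; omega
    rw [bLoop]
    simp [hc]

theorem main_lemma : ∀ (fuel : Nat) (fs ps sol : List Int) (cov : Option Int),
    fs.length + ps.length ≤ fuel →
    fs.Pairwise (· ≤ ·) → ps.Pairwise (· ≤ ·) →
    (∀ p ∈ ps, ∃ f ∈ fs, f - 10 ≤ p ∧ p ≤ f + 10) →
    (∀ c, cov = some c → ∀ p ∈ ps, c < p) →
    aLoop fuel fs ps sol = bLoop fs ps cov sol := by
  intro fuel
  induction fuel with
  | zero =>
    intro fs ps sol cov hfuel _ _ _ _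
    have hfs : fs = [] := List.eq_nil_of_length_eq_zero (by omega)
    have hps : ps = [] := List.eq_nil_of_length_eq_zero (by omega)
    subst hfs; subst hps; simp [aLoop, bLoop]
  | succ fuel ih =>
    intro fs ps sol cov hfuel hfs hps hcover hcov
    match ps with
    | [] =>
      match fs with
      | [] => simp [aLoop, bLoop]
      | _ :: _ => simp [aLoop, bLoop]
    | p0 :: pt =>
      match fs with
      | [] =>
        rcases hcover p0 (by simp) with ⟨f, hf, _⟩
        exact absurd hf (by simp)
      | f0 :: rest =>
        -- the assert passes: the smallest lamp reaches at least to p0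
        have hhead : ∀ f ∈ rest, f0 ≤ f := fun f hf => (List.pairwise_cons.mp hfs).1 f hf
        have hassert : f0 - 10 ≤ p0 := by
          rcases hcover p0 (by simp) with ⟨f, hf, h1, h2⟩
          rcases List.mem_cons.mp hf with rfl | hf
          · omega
          · have := hhead f hf; omega
        -- under the invariant B never takes the skip branch on p0
        have hnoskip : ∀ c, cov = some c → c < p0 := fun c hc => hcov c hc p0 (by simp)
        have hps' : pt.Pairwise (· ≤ ·) := (List.pairwise_cons.mp hps).2
        match rest with
        | f1 :: t =>
          by_cases hdisc : f1 - 10 ≤ p0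
          · -- discard branch: both drop f0
            have hA : aLoop (fuel + 1) (f0 :: f1 :: t) (p0 :: pt) sol
                = aLoop fuel (f1 :: t) (p0 :: pt) sol := by
              simp [aLoop, hassert, hdisc]
            have hcover' : ∀ p ∈ p0 :: pt, ∃ f ∈ f1 :: t, f - 10 ≤ p ∧ p ≤ f + 10 := by
              intro p hp
              rcases hcover p hp with ⟨f, hf, h1, h2⟩
              rcases List.mem_cons.mp hf with rfl | hf
              · -- only f0 covers p: then f1 covers it too, since p0 ≤ p
                refine ⟨f1, by simp, ?_, ?_⟩
                · have hp0p : p0 ≤ p := by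
                    rcases List.mem_cons.mp hp with rfl | hp
                    · omega
                    · exact (List.pairwise_cons.mp hps).1 p hp
                  omega
                · have := hhead f1 (by simp); omega
              · exact ⟨f, hf, h1, h2⟩
            have hB := ih (f1 :: t) (p0 :: pt) sol cov (by simp at hfuel ⊢; omega)
              (List.pairwise_cons.mp hfs).2 hps hcover' hcov
            rw [hA, hB]
            -- peel one step of bLoop on each side: B's pointer advance passes f0 too
            rw [bLoop_cons_noskip _ _ _ _ _ hnoskip, bLoop_cons_noskip _ _ _ _ _ hnoskip]
            have : bAdvance (f0 :: f1 :: t) p0 = bAdvance (f1 :: t) p0 := by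
              simp [bAdvance, hdisc]
            rw [this]
          · -- select branch: f0 is the chosen lamp
            have hsel : p0 ≤ f0 + 10 := by
              rcases hcover p0 (by simp) with ⟨f, hf, h1, h2⟩
              rcases List.mem_cons.mp hf with rfl | hf
              · omega
              · have h3 := hhead f hf
                have h4 : f1 ≤ f ∨ f = f1 := by
                  rcases List.mem_cons.mp hf with rfl | hf'
                  · right; rfl
                  · left; exact ((List.pairwise_cons.mp hfs).2.rel_head_tail hf')
                omega
            have hA : aLoop (fuel + 1) (f0 :: f1 :: t) (p0 :: pt) sol
                = aLoop fuel (f0 :: f1 :: t) (aDrop f0 pt) (sol ++ [f0]) := by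
              simp [aLoop, hassert, hdisc, aDrop, hsel]
            have hsub := aDrop_sublist f0 pt
            have hB := ih (f0 :: f1 :: t) (aDrop f0 pt) (sol ++ [f0]) (some (f0 + 10))
              (by have := hsub.length_le; simp at hfuel ⊢; omega)
              hfs (hps'.sublist hsub)
              (fun p hp => hcover p (List.mem_cons_of_mem _ (hsub.mem hp)))
              (by intro c hc; injection hc with hc; subst hc; exact aDrop_gt f0 pt hps')
            rw [hA, hB, ← bLoop_skip, bLoop_cons_noskip _ _ _ _ _ hnoskip]
            have : bAdvance (f0 :: f1 :: t) p0 = f0 :: f1 :: t := by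
              simp [bAdvance, hdisc]
            rw [this]
            simp [hassert, hsel]
        | [] =>
          have hsel : p0 ≤ f0 + 10 := by
            rcases hcover p0 (by simp) with ⟨f, hf, h1, h2⟩
            rcases List.mem_cons.mp hf with rfl | hf
            · omega
            · simp at hf
          have hA : aLoop (fuel + 1) [f0] (p0 :: pt) sol
              = aLoop fuel [f0] (aDrop f0 pt) (sol ++ [f0]) := by
            simp [aLoop, hassert, aDrop, hsel]
          have hsub := aDrop_sublist f0 pt
          have hB := ih [f0] (aDrop f0 pt) (sol ++ [f0]) (some (f0 + 10))
            (by have := hsub.length_le; simp at hfuel ⊢; omega)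
            hfs (hps'.sublist hsub)
            (fun p hp => hcover p (List.mem_cons_of_mem _ (hsub.mem hp)))
            (by intro c hc; injection hc with hc; subst hc; exact aDrop_gt f0 pt hps')
          rw [hA, hB, ← bLoop_skip, bLoop_cons_noskip _ _ _ _ _ hnoskip]
          have : bAdvance [f0] p0 = [f0] := by simp [bAdvance]
          rw [this]
          simp [hassert, hsel]

-- ===== VERDICT (by name: the statement is the Claim_ definition above) =====
theorem enciende_farolas_spec : Claim_equal_enciende_farolas := by
  intro farolas puntos _ hpre
  unfold Spec_enciende_farolas enciende_farolas enciende_farolas_alt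
  apply main_lemma
  · simp [PySem.List.length_sorted]
  · simpa using PySem.List.sorted_pairwise farolas (fun x => x)
  · simpa using PySem.List.sorted_pairwise puntos (fun x => x)
  · intro p hp
    rcases hpre p ((PySem.List.mem_sorted _ _ _ _).mp hp) with ⟨f, hf, h⟩
    exact ⟨f, (PySem.List.mem_sorted _ _ _ _).mpr hf, h⟩
  · intro c hc; cases hc
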